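-- pv_equiv track=rewrite | github.com/enjoy-digital/liteeth | liteeth/mac/crc.py | crc_calc
-- ===== SOURCE A (Python) =====
-- def crc_calc(data_width, width, polynom, crc_prev, data):
--     """
--     Calculate the next CRC value. Functionally equivalent to the migen CRCEngine, but as a python function
--
--     Parameters
--     ----------
--     data_width : int
--         The bit width of data
--     width : int
--         The bit width of the CRC value
--     polynom : int
--         The polynomial used for the CRC calculation, specified as an integer (e.g., 0x04C11DB7 for IEEE 802.3).
--     crc_prev : int
--         The previous CRC value
--     data : int
--         The new data word
--
--     Returns
--     -------
--     int
--         The next CRC value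
--     """
--     # Convert crc_prev into a list of bits (LSB first) for easier bitwise operations
--     state = [(crc_prev >> i) & 1 for i in range(width)]
--
--     # Process each bit of the input data (assumed LSB-first).
--     for n in range(data_width):
--         d = (data >> n) & 1
--         feedback = state[-1] ^ d
--         state.pop()
--
--         # For each remaining bit position (positions 0 .. width-2),
--         # if the corresponding tap (at bit position pos+1 in the polynomial)
--         # is active, XOR the feedback into that bit.
--         for pos in range(width - 1):
--             if (polynom >> (pos + 1)) & 1:
--                 state[pos] ^= feedback
--         # Insert the feedback at the beginning of the state (this is equivalent
--         # to shifting the register and feeding in the new bit).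
--         state.insert(0, feedback)
--
--     crc_next = 0
--     for i, bit in enumerate(state):
--         if bit:
--             crc_next |= (1 << i)
--     return crc_next
-- ===== SOURCE B (Python) =====
-- def crc_calc(data_width, width, polynom, crc_prev, data):
--     # Integer-state CRC: the whole register lives in one int; each data bit
--     # costs O(1) (shift, mask, one XOR of the tap mask) instead of an
--     # O(width) per-bit tap loop over a list of bits.
--     mask = (1 << width) - 1
--     xor_mask = polynom & (mask - 1)  # taps sit at bit positions 1..width-1
--     s = crc_prev & mask
--     for n in range(data_width):
--         feedback = ((s >> (width - 1)) ^ (data >> n)) & 1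
--         s = (((s << 1) | feedback) & mask) ^ (feedback * xor_mask)
--     return s
-- ===== Notes on version B (the rewrite author's own statement) =====
-- stated objective: faster
-- what changed: State is kept as one integer instead of a Python list of bits: the O(width) inner tap loop and the list pop/insert/rebuild passes are replaced by a constant number of shift/mask operations plus a single XOR of a precomputed tap mask per data bit.
-- outside the precondition, e.g. on crc_calc(0, -1, 0, 0, 0): A returns 0, B raises ValueError
import Mathlib
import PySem

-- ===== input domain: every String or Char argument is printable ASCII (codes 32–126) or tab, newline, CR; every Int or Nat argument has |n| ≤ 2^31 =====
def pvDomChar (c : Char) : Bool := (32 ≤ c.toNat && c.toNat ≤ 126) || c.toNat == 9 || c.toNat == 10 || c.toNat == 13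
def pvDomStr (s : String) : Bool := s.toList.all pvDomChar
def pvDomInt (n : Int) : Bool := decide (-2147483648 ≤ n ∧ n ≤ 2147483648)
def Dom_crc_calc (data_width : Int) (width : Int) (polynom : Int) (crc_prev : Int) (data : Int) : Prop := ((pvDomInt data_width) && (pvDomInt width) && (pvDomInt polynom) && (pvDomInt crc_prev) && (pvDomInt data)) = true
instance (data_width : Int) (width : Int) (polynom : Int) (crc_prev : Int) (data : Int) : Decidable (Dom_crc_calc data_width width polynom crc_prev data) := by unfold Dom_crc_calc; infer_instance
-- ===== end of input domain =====

-- B replaces A's per-data-bit O(width) tap loop over a Python list of bits by an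
-- integer register updated with shift/mask and one XOR of a precomputed tap mask
-- (objective: faster).

-- Python's `x >> k` / `x << k` for the nonnegative shift counts both programs use
-- (exact there; Python raises on k < 0, which no admitted input reaches).
def pvShr (x : Int) (k : Int) : Int := x >>> k.toNat
def pvShl (x : Int) (k : Int) : Int := x <<< k.toNat

-- ===== PORT A =====
-- body of A's outer `for n in range(data_width)` loop
def crcA_step (width : Int) (polynom : Int) (data : Int) (state : List Int) (n : Int) : List Int :=
  let d := PySem.Int.band (pvShr data n) 1
  let feedback := PySem.Int.bxor (PySem.List.pyGetD state (-1) 0) d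
  let state1 := ((PySem.List.pop? state (-1)).map Prod.snd).getD state
  -- A's inner `for pos in range(width - 1)` loop, `state[pos] ^= feedback` at the
  -- active taps: the same per-index update applied position-wise (state1 has length
  -- exactly width - 1 whenever Python reaches this loop)
  let state2 := state1.mapIdx (fun pos x =>
      if PySem.Int.band (pvShr polynom ((pos : Int) + 1)) 1 ≠ 0 then PySem.Int.bxor x feedback else x)
  PySem.List.insert state2 0 feedback

def crc_calc (data_width : Int) (width : Int) (polynom : Int) (crc_prev : Int) (data : Int) : Int :=
  let state0 : List Int :=
    (PySem.List.pyRange 0 width 1).map (fun i => PySem.Int.band (pvShr crc_prev i) 1)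
  let stateF := (PySem.List.pyRange 0 data_width 1).foldl (crcA_step width polynom data) state0
  -- `for i, bit in enumerate(state): if bit: crc_next |= (1 << i)` as a fold
  -- carrying the pair (crc_next, i)
  (stateF.foldl (fun (p : Int × Int) bit =>
    (if bit ≠ 0 then PySem.Int.bor p.1 (pvShl 1 p.2) else p.1, p.2 + 1)) (0, 0)).1

-- ===== PORT B =====
-- body of B's `for n in range(data_width)` loop
def crcB_step (width : Int) (data : Int) (mask : Int) (xorMask : Int) (s : Int) (n : Int) : Int :=
  let feedback := PySem.Int.band (PySem.Int.bxor (pvShr s (width - 1)) (pvShr data n)) 1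
  PySem.Int.bxor (PySem.Int.band (PySem.Int.bor (pvShl s 1) feedback) mask) (feedback * xorMask)

def crc_calc_alt (data_width : Int) (width : Int) (polynom : Int) (crc_prev : Int) (data : Int) : Int :=
  let mask : Int := pvShl 1 width - 1
  let xorMask := PySem.Int.band polynom (mask - 1)
  let s := PySem.Int.band crc_prev mask
  (PySem.List.pyRange 0 data_width 1).foldl (crcB_step width data mask xorMask) s

-- ===== PRECONDITION & SPEC =====
-- Pre_ excludes (a) width ≤ 0 with data_width ≥ 1, where A raises IndexError on the
-- empty bit list, and (b) width < 0 with data_width ≤ 0, where A returns 0 from the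
-- never-touched empty register while B's own `1 << width` raises ValueError.
def Pre_crc_calc (data_width : Int) (width : Int) (polynom : Int) (crc_prev : Int) (data : Int) : Prop :=
  1 ≤ width ∨ (width = 0 ∧ data_width ≤ 0)
instance (data_width : Int) (width : Int) (polynom : Int) (crc_prev : Int) (data : Int) : Decidable (Pre_crc_calc data_width width polynom crc_prev data) := by unfold Pre_crc_calc; infer_instance

def pvWitness_crc_calc : Int × Int × Int × Int × Int := (8, 32, 79764919, 0, 214)

def Spec_crc_calc (data_width : Int) (width : Int) (polynom : Int) (crc_prev : Int) (data : Int) (out : Int) : Prop := out = crc_calc_alt data_width width polynom crc_prev data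
instance (data_width : Int) (width : Int) (polynom : Int) (crc_prev : Int) (data : Int) (out : Int) : Decidable (Spec_crc_calc data_width width polynom crc_prev data out) := by unfold Spec_crc_calc; infer_instance

-- ===== CLAIM (what is proved, stated in full; the proofs are below) =====
def Claim_equal_crc_calc : Prop := ∀ (data_width : Int) (width : Int) (polynom : Int) (crc_prev : Int) (data : Int), Dom_crc_calc data_width width polynom crc_prev data → Pre_crc_calc data_width width polynom crc_prev data → Spec_crc_calc data_width width polynom crc_prev data (crc_calc data_width width polynom crc_prev data)

-- ===== LEMMAS AND PROOFS =====

-- `pvIbit x k` is bit k of x in Python's infinite two's complement reading.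
def pvIbit (x : Int) (k : Nat) : Bool := decide ((x >>> k) % 2 = 1)
def pvBitI (M : Nat) (i : Nat) : Int := if M.testBit i then 1 else 0
def pvBits (w M : Nat) : List Int := (List.range w).map (pvBitI M)
def pvStepN (w XM M f : Nat) : Nat := ((M <<< 1 ||| f) &&& (2^w - 1)) ^^^ f * XM

theorem pvShr_natCast (x : Int) (k : Nat) : pvShr x (k : Int) = x >>> k := by
  simp [pvShr]

theorem pv_band_shift_one (x : Int) (k : Nat) :
    PySem.Int.band (x >>> k) 1 = if pvIbit x k then 1 else 0 := by
  rw [PySem.Int.band_one, PySem.Int.mod_eq_emod_of_pos (by norm_num)]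
  unfold pvIbit
  rcases Int.emod_two_eq (x >>> k) with h | h <;> simp [h]

theorem pv_band_one' (y : Int) : PySem.Int.band y 1 = if pvIbit y 0 then 1 else 0 := by
  have h := pv_band_shift_one y 0
  rwa [Int.shiftRight_zero] at h

theorem pvIbit_natCast (m k : Nat) : pvIbit (m : Int) k = m.testBit k := by
  unfold pvIbit
  have h1 : ((m:Int) >>> k) = ((m >>> k : Nat) : Int) := rfl
  rw [h1, Nat.testBit_eq_decide_div_mod_eq, Nat.shiftRight_eq_div_pow]
  have key : (((m / 2^k : Nat) : Int) % 2 = 1) ↔ (m / 2^k % 2 = 1) := by omega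
  simp only [key]

theorem pvIbit_negSucc (m k : Nat) : pvIbit (Int.negSucc m) k = !m.testBit k := by
  unfold pvIbit
  have h1 : (Int.negSucc m) >>> k = Int.negSucc (m >>> k) := rfl
  rw [h1, Nat.testBit_eq_decide_div_mod_eq, Nat.shiftRight_eq_div_pow]
  have key : ((Int.negSucc (m / 2^k)) % 2 = 1) ↔ ¬(m / 2^k % 2 = 1) := by
    rw [Int.negSucc_eq]; omega
  simp only [key]
  rcases Nat.mod_two_eq_zero_or_one (m / 2^k) with h|h <;> simp [h]

theorem pv_and_div_two (n m : Nat) : (n &&& m) / 2 = n / 2 &&& m / 2 := by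
  apply Nat.eq_of_testBit_eq; intro j
  have h : ∀ x : Nat, (x / 2).testBit j = x.testBit (j+1) := by
    intro x; rw [Nat.testBit_add_one]
  rw [h, Nat.testBit_and, Nat.testBit_and, ← h, ← h]

theorem pv_mod_two_le (n m : Nat) : (n &&& m) % 2 ≤ n % 2 := by
  have h := Nat.testBit_and n m 0
  simp only [Nat.testBit_zero] at h
  rcases Nat.mod_two_eq_zero_or_one n with h1|h1 <;> rcases Nat.mod_two_eq_zero_or_one (n &&& m) with h2|h2 <;>
    simp [h1, h2] at h ⊢

theorem pv_sub_and_testBit (k : Nat) : ∀ n m : Nat,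
    (n - (n &&& m)).testBit k = (n.testBit k && !(m.testBit k)) := by
  induction k with
  | zero =>
    intro n m
    have hle := pv_mod_two_le n m
    have hd2 : (n &&& m) / 2 ≤ n / 2 := by
      rw [pv_and_div_two]; exact Nat.and_le_left
    have hdecomp : (n - (n &&& m)) % 2 = n % 2 - (n &&& m) % 2 := by omega
    have h := Nat.testBit_and n m 0
    simp only [Nat.testBit_zero] at *
    rcases Nat.mod_two_eq_zero_or_one n with h1|h1 <;> rcases Nat.mod_two_eq_zero_or_one m with h2|h2 <;>
      rcases Nat.mod_two_eq_zero_or_one (n &&& m) with h3|h3 <;>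
      simp [h1, h2, h3, hdecomp] at h ⊢
  | succ k ih =>
    intro n m
    have hle := pv_mod_two_le n m
    have hd2 : (n &&& m) / 2 ≤ n / 2 := by
      rw [pv_and_div_two]; exact Nat.and_le_left
    have hdiv : (n - (n &&& m)) / 2 = n / 2 - (n / 2 &&& m / 2) := by
      rw [← pv_and_div_two]; omega
    rw [Nat.testBit_add_one, Nat.testBit_add_one, Nat.testBit_add_one, hdiv]
    exact ih (n / 2) (m / 2)

theorem pv_band_negSucc_natCast (m n : Nat) :
    PySem.Int.band (Int.negSucc m) (n : Int) = ((n - (n &&& m) : Nat) : Int) := by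
  unfold PySem.Int.band
  have h1 : ¬ (0 ≤ (Int.negSucc m)) := by simp [Int.negSucc_eq]; omega
  have h2 : (0:Int) ≤ (n : Int) := by positivity
  simp only [h1, h2, if_true, if_false]
  have h3 : (-(Int.negSucc m) - 1).toNat = m := by simp [Int.negSucc_eq]
  simp [h3]

theorem pv_band_cast_nonneg (x : Int) (n : Nat) : 0 ≤ PySem.Int.band x (n : Int) := by
  cases x with
  | ofNat m =>
    rw [show (Int.ofNat m) = ((m:Nat):Int) from rfl, PySem.Int.band_natCast]; positivity
  | negSucc m => rw [pv_band_negSucc_natCast]; positivity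

theorem pv_band_cast_testBit (x : Int) (n k : Nat) :
    (PySem.Int.band x (n : Int)).toNat.testBit k = (pvIbit x k && n.testBit k) := by
  cases x with
  | ofNat m =>
    rw [show (Int.ofNat m) = ((m:Nat):Int) from rfl, PySem.Int.band_natCast]
    simp [Nat.testBit_and, pvIbit_natCast]
  | negSucc m =>
    rw [pv_band_negSucc_natCast]
    simp [pv_sub_and_testBit, pvIbit_negSucc, Bool.and_comm]

theorem pv_bxor_natCast_negSucc (a n : Nat) :
    PySem.Int.bxor (a : Int) (Int.negSucc n) = Int.negSucc (a ^^^ n) := by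
  unfold PySem.Int.bxor
  have h1 : (0:Int) ≤ (a : Int) := by positivity
  have h2 : ¬ (0 ≤ (Int.negSucc n)) := by simp [Int.negSucc_eq]; omega
  simp only [h1, h2, if_true, if_false]
  have h3 : (-(Int.negSucc n) - 1).toNat = n := by simp [Int.negSucc_eq]
  simp [h3, Int.negSucc_eq]
  omega

theorem pv_band_one_bxor (a : Nat) (x : Int) :
    PySem.Int.band (PySem.Int.bxor (a : Int) x) 1
      = if (a.testBit 0 != pvIbit x 0) then (1:Int) else 0 := by
  cases x with
  | ofNat n =>
    rw [show Int.ofNat n = ((n:Nat):Int) from rfl, PySem.Int.bxor_natCast, pv_band_one',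
      pvIbit_natCast, pvIbit_natCast, Nat.testBit_xor]
  | negSucc n =>
    rw [pv_bxor_natCast_negSucc, pv_band_one', pvIbit_negSucc, pvIbit_negSucc, Nat.testBit_xor]
    cases a.testBit 0 <;> cases n.testBit 0 <;> simp

theorem pv_bxor_bits (a b : Bool) :
    PySem.Int.bxor (if a then (1:Int) else 0) (if b then (1:Int) else 0)
      = if (a != b) then (1:Int) else 0 := by cases a <;> cases b <;> decide

-- the tap loop of A on a list of register bits
theorem pv_tap_mapIdx (polynom fb : Int) (M m : Nat) :
    List.mapIdx (fun pos x =>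
      if PySem.Int.band (pvShr polynom ((pos : Int) + 1)) 1 ≠ 0 then PySem.Int.bxor x fb else x)
      (pvBits m M)
    = (List.range m).map (fun i =>
        if pvIbit polynom (i+1) then PySem.Int.bxor (pvBitI M i) fb else pvBitI M i) := by
  apply List.ext_getElem (by simp [pvBits])
  intro j h1 h2
  rw [List.getElem_mapIdx]
  simp only [pvBits, List.getElem_map, List.getElem_range]
  have hcond : (PySem.Int.band (pvShr polynom ((j : Int) + 1)) 1 ≠ 0) ↔ pvIbit polynom (j+1) = true := by
    rw [show ((j:Int) + 1) = ((j+1 : Nat) : Int) by push_cast; ring, pvShr_natCast, pv_band_shift_one]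
    cases pvIbit polynom (j+1) <;> simp
  by_cases hc : pvIbit polynom (j+1) = true
  · rw [if_pos (hcond.mpr hc), if_pos hc]
  · rw [if_neg (fun h => hc (hcond.mp h)), if_neg hc]

theorem pv_recomb (M C k : Nat) :
    (if M.testBit 0 then C ||| 1 <<< k else C) ||| ((M >>> 1) <<< (k+1)) = C ||| (M <<< k) := by
  apply Nat.eq_of_testBit_eq; intro j
  rw [Nat.one_shiftLeft]
  rcases Nat.lt_trichotomy j k with h | h | h
  · cases hM : M.testBit 0 <;>
      simp [Nat.testBit_or, Nat.testBit_shiftLeft, Nat.testBit_two_pow, hM,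
        show ¬ (j ≥ k) by omega, show ¬ (j ≥ k+1) by omega, show ¬ k = j by omega]
  · subst h
    cases hM : M.testBit 0 <;>
      simp [Nat.testBit_or, Nat.testBit_shiftLeft, Nat.testBit_two_pow, hM,
        show ¬ (j ≥ j+1) by omega]
  · have h3 : 1 + (j - (k+1)) = j - k := by omega
    cases hM : M.testBit 0 <;>
      simp [Nat.testBit_or, Nat.testBit_shiftLeft, Nat.testBit_shiftRight, hM,
        show (j ≥ k) by omega, show (j ≥ k+1) by omega, show ¬ k = j by omega, h3, Bool.or_assoc]

theorem pv_bits_succ (w M : Nat) : pvBits (w+1) M = pvBitI M 0 :: pvBits w (M >>> 1) := by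
  unfold pvBits
  rw [List.range_succ_eq_map, List.map_cons, List.map_map]
  congr 1
  apply List.map_congr_left; intro i _
  simp only [Function.comp_apply, pvBitI, Nat.testBit_add_one, Nat.shiftRight_one, Nat.succ_eq_add_one]
  rfl

theorem pv_recon (w : Nat) : ∀ (M C k : Nat), M < 2^w →
    (pvBits w M).foldl (fun (p : Int × Int) bit =>
      (if bit ≠ 0 then PySem.Int.bor p.1 (pvShl 1 p.2) else p.1, p.2 + 1)) ((C : Int), (k : Int))
    = (((((C ||| (M <<< k) : Nat))) : Int), ((k + w : Nat) : Int)) := by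
  induction w with
  | zero =>
    intro M C k hM
    have : M = 0 := by omega
    subst this
    simp [pvBits, Nat.zero_shiftLeft]
  | succ w ih =>
    intro M C k hM
    rw [pv_bits_succ, List.foldl_cons]
    have hM2 : M >>> 1 < 2^w := by
      have h2 : 2^(w+1) = 2*2^w := by ring
      have h3 : M >>> 1 = M / 2 := Nat.shiftRight_one M
      omega
    have hsh : pvShl 1 ((k:Int)) = ((1 <<< k : Nat) : Int) := by
      simp [pvShl]
    have hbody : (((if (pvBitI M 0) ≠ 0 then PySem.Int.bor (C : Int) (pvShl 1 ((k:Int))) else (C : Int)), ((k:Int) + 1))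
        : Int × Int)
        = ((((if M.testBit 0 then C ||| 1 <<< k else C : Nat)) : Int), ((k+1 : Nat) : Int)) := by
      cases hM0 : M.testBit 0
      · simp [pvBitI, hM0]
      · simp only [pvBitI, hM0, if_true]
        rw [if_pos (by norm_num), hsh, PySem.Int.bor_natCast]
        simp
    rw [hbody, ih _ _ _ hM2, pv_recomb]
    have : k + 1 + w = k + (w+1) := by omega
    rw [this]

theorem pv_two_pow_sub_two_testBit (w k : Nat) (hw : 1 ≤ w) :
    (2^w - 2).testBit k = (decide (1 ≤ k) && decide (k < w)) := by
  have h : 2^w - 2 = (2^(w-1) - 1) <<< 1 := by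
    rw [Nat.shiftLeft_eq]
    have h2 : 2^w = 2^(w-1) * 2 := by
      rw [← Nat.pow_succ]; congr 1; omega
    omega
  rw [h, Nat.testBit_shiftLeft, Nat.testBit_two_pow_sub_one]
  by_cases h1 : 1 ≤ k
  · simp [h1, show (k ≥ 1) from h1, show (k - 1 < w - 1) ↔ (k < w) by omega]
  · simp [show ¬ (k ≥ 1) from h1]

theorem pv_stepN_bit0 (w' XM M : Nat) (fb : Bool) (hXM0 : XM.testBit 0 = false) :
    (pvStepN (w'+1) XM M (if fb then 1 else 0)).testBit 0 = fb := by
  unfold pvStepN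
  cases fb <;>
    simp only [if_true, if_false, Nat.one_mul, Nat.zero_mul, Nat.testBit_xor, Nat.testBit_and,
      Nat.testBit_or, Nat.testBit_shiftLeft, Nat.testBit_two_pow_sub_one, hXM0,
      Nat.zero_testBit, Nat.testBit_one_zero] <;>
    simp

theorem pv_stepN_bit_succ (w' XM M : Nat) (fb : Bool) (i : Nat) (hi : i < w') :
    (pvStepN (w'+1) XM M (if fb then 1 else 0)).testBit (i+1)
      = (M.testBit i ^^ (fb && XM.testBit (i+1))) := by
  unfold pvStepN
  have h1 : (1 : Nat).testBit (i+1) = false := by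
    simp [Nat.testBit_succ]
  have h0 : (0 : Nat).testBit (i+1) = false := Nat.zero_testBit _
  cases fb <;>
    simp only [if_true, if_false, Nat.one_mul, Nat.zero_mul, Nat.testBit_xor, Nat.testBit_and,
      Nat.testBit_or, Nat.testBit_shiftLeft, Nat.testBit_two_pow_sub_one, h1, h0, Nat.zero_testBit] <;>
    simp [show (i+1 ≥ 1) by omega, show i+1 < w'+1 by omega, Nat.add_sub_cancel]

theorem pv_stepN_lt (w XM M f : Nat) (hf : f ≤ 1) (hXM : ∀ k, w ≤ k → XM.testBit k = false) :
    pvStepN w XM M f < 2^w := by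
  apply Nat.lt_pow_two_of_testBit
  intro i hi
  unfold pvStepN
  have hfXM : (f * XM).testBit i = false := by
    interval_cases f
    · simp
    · simpa using hXM i hi
  simp [Nat.testBit_xor, Nat.testBit_and, Nat.testBit_two_pow_sub_one, hfXM,
    show ¬ (i < w) by omega]

theorem pv_bits_snoc (w M : Nat) : pvBits (w+1) M = pvBits w M ++ [pvBitI M w] := by
  unfold pvBits
  rw [List.range_succ, List.map_append, List.map_cons, List.map_nil]

theorem pv_bits_cons (w M : Nat) :
    pvBits (w+1) M = pvBitI M 0 :: (List.range w).map (fun i => pvBitI M (i+1)) := by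
  unfold pvBits
  rw [List.range_succ_eq_map, List.map_cons, List.map_map]
  rfl

theorem pv_step_sim (width polynom data : Int) (w' : Nat) (hwidth : width = ((w'+1 : Nat) : Int))
    (XM : Nat) (hXM : ∀ k, XM.testBit k = (pvIbit polynom k && (decide (1 ≤ k) && decide (k < w'+1))))
    (M : Nat) (n : Int) :
    crcA_step width polynom data (pvBits (w'+1) M) n
      = pvBits (w'+1) (pvStepN (w'+1) XM M (if (M.testBit w' != pvIbit data n.toNat) then 1 else 0))
    ∧ crcB_step width data (((2^(w'+1) - 1 : Nat)) : Int) ((XM : Nat) : Int) ((M : Nat) : Int) n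
      = ((pvStepN (w'+1) XM M (if (M.testBit w' != pvIbit data n.toNat) then 1 else 0) : Nat) : Int) := by
  set fb : Bool := (M.testBit w' != pvIbit data n.toNat) with hfb
  set F : Nat := if fb then 1 else 0 with hF
  set M' : Nat := pvStepN (w'+1) XM M F with hM'
  have hw1 : width - 1 = (w' : Int) := by rw [hwidth]; push_cast; ring
  have hXM0 : XM.testBit 0 = false := by rw [hXM 0]; simp
  have hfI : ∀ y : Int, PySem.Int.bxor (pvBitI M w') (if pvIbit data n.toNat then (1:Int) else 0)
      = if fb then (1:Int) else 0 := by
    intro _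
    rw [show pvBitI M w' = if M.testBit w' then (1:Int) else 0 from rfl, pv_bxor_bits, hfb]
  constructor
  · -- A side
    simp only [crcA_step]
    rw [show pvShr data n = data >>> n.toNat from rfl, pv_band_shift_one]
    -- state[-1]
    have hlen : (pvBits (w'+1) M).length = w'+1 := by simp [pvBits]
    have hlast : PySem.List.pyGetD (pvBits (w'+1) M) (-1) 0 = pvBitI M w' := by
      rw [PySem.List.pyGetD_neg_ofNat (pvBits (w'+1) M) 1 0 (by omega) (by omega)]
      simp [pvBits]
    rw [hlast]
    -- pop
    have hpop : ((PySem.List.pop? (pvBits (w'+1) M) (-1)).map Prod.snd).getD (pvBits (w'+1) M)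
        = pvBits w' M := by
      rw [pv_bits_snoc, PySem.List.pop?_last]
      rfl
    rw [hpop, hfI 0]
    rw [pv_tap_mapIdx polynom (if fb then (1:Int) else 0) M w', PySem.List.insert_zero]
    -- compare with pvBits (w'+1) M'
    rw [pv_bits_cons]
    congr 1
    · -- head
      rw [show pvBitI M' 0 = if M'.testBit 0 then (1:Int) else 0 from rfl, hM', hF,
        pv_stepN_bit0 w' XM M fb hXM0]
    · -- tail
      apply List.map_congr_left
      intro i hi
      simp only [List.mem_range] at hi
      have hb := pv_stepN_bit_succ w' XM M fb i hi
      rw [← hF, ← hM'] at hb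
      have hXMi := hXM (i+1)
      by_cases hc : pvIbit polynom (i+1)
      · rw [if_pos hc]
        rw [show pvBitI M i = if M.testBit i then (1:Int) else 0 from rfl, pv_bxor_bits]
        rw [show pvBitI M' (i+1) = if M'.testBit (i+1) then (1:Int) else 0 from rfl, hb, hXMi]
        simp only [hc, decide_true, Bool.and_true, Bool.true_and,
          show decide (1 ≤ i+1) = true by simp, show decide (i+1 < w'+1) = true by simp [hi]]
      · rw [if_neg hc]
        rw [show pvBitI M' (i+1) = if M'.testBit (i+1) then (1:Int) else 0 from rfl, hb, hXMi]
        simp only [hc, decide_false, Bool.false_and, Bool.and_false, Bool.xor_false]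
        rfl
  · -- B side
    simp only [crcB_step]
    have h1 : pvShr ((M:Nat) : Int) (width - 1) = (((M >>> w' : Nat)) : Int) := by
      rw [hw1, pvShr_natCast]
      rfl
    rw [h1, show pvShr data n = data >>> n.toNat from rfl]
    have h2 := pv_band_one_bxor (M >>> w') (data >>> n.toNat)
    rw [h2, show pvIbit (data >>> n.toNat) 0 = pvIbit data n.toNat by
        unfold pvIbit; rw [Int.shiftRight_zero]]
    have h3 : (M >>> w').testBit 0 = M.testBit w' := by
      simp [Nat.testBit_shiftRight]
    rw [h3, ← hfb]
    have h4 : (if fb then (1:Int) else 0) = ((F : Nat) : Int) := by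
      rw [hF]; cases fb <;> simp
    rw [h4]
    have h5 : pvShl ((M:Nat) : Int) 1 = (((M <<< 1 : Nat)) : Int) := rfl
    rw [h5, PySem.Int.bor_natCast, PySem.Int.band_natCast,
      show ((F:Nat):Int) * ((XM:Nat):Int) = ((F * XM : Nat) : Int) by push_cast; ring,
      PySem.Int.bxor_natCast]
    rw [hM']
    rfl

theorem pv_loop_sim (width polynom data : Int) (w' : Nat) (hwidth : width = ((w'+1 : Nat) : Int))
    (XM : Nat) (hXM : ∀ k, XM.testBit k = (pvIbit polynom k && (decide (1 ≤ k) && decide (k < w'+1)))) :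
    ∀ (l : List Int) (M : Nat), M < 2^(w'+1) →
    ∃ M' : Nat, M' < 2^(w'+1)
      ∧ l.foldl (crcA_step width polynom data) (pvBits (w'+1) M) = pvBits (w'+1) M'
      ∧ l.foldl (crcB_step width data (((2^(w'+1) - 1 : Nat)) : Int) ((XM : Nat) : Int)) ((M : Nat) : Int) = ((M' : Nat) : Int) := by
  intro l
  induction l with
  | nil =>
    intro M hM
    exact ⟨M, hM, rfl, rfl⟩
  | cons a l ih =>
    intro M hM
    obtain ⟨hA, hB⟩ := pv_step_sim width polynom data w' hwidth XM hXM M a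
    set F : Nat := if (M.testBit w' != pvIbit data a.toNat) then 1 else 0 with hF
    have hFle : F ≤ 1 := by rw [hF]; split <;> omega
    have hNlt : pvStepN (w'+1) XM M F < 2^(w'+1) := by
      apply pv_stepN_lt _ _ _ _ hFle
      intro k hk
      rw [hXM k]
      simp [show ¬ (k < w'+1) by omega]
    obtain ⟨M', hM'lt, hA', hB'⟩ := ih (pvStepN (w'+1) XM M F) hNlt
    refine ⟨M', hM'lt, ?_, ?_⟩
    · rw [List.foldl_cons, hA, hA']
    · rw [List.foldl_cons, hB, hB']

theorem pv_pow_ge_two (w' : Nat) : 2 ≤ 2^(w'+1) := by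
  calc (2:Nat) = 2^1 := rfl
  _ ≤ 2^(w'+1) := Nat.pow_le_pow_right (by omega) (by omega)

-- ===== VERDICT (by name: the statement is the Claim_ definition above) =====
theorem crc_calc_spec : Claim_equal_crc_calc := by
  intro data_width width polynom crc_prev data _ hPre
  unfold Spec_crc_calc
  rcases hPre with hw | ⟨hw0, hdw⟩
  · -- width ≥ 1
    obtain ⟨w', hwidth⟩ : ∃ w' : Nat, width = ((w'+1 : Nat) : Int) := by
      refine ⟨width.toNat - 1, ?_⟩
      omega
    set XM : Nat := (PySem.Int.band polynom (((2^(w'+1) - 2 : Nat)) : Int)).toNat with hXMdef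
    have hXMcast : PySem.Int.band polynom (((2^(w'+1) - 2 : Nat)) : Int) = ((XM : Nat) : Int) :=
      (Int.toNat_of_nonneg (pv_band_cast_nonneg _ _)).symm
    have hXM : ∀ k, XM.testBit k = (pvIbit polynom k && (decide (1 ≤ k) && decide (k < w'+1))) := by
      intro k
      rw [hXMdef, pv_band_cast_testBit, pv_two_pow_sub_two_testBit _ _ (by omega)]
    set M0 : Nat := (PySem.Int.band crc_prev (((2^(w'+1) - 1 : Nat)) : Int)).toNat with hM0def
    have hM0cast : PySem.Int.band crc_prev (((2^(w'+1) - 1 : Nat)) : Int) = ((M0 : Nat) : Int) :=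
      (Int.toNat_of_nonneg (pv_band_cast_nonneg _ _)).symm
    have hM0lt : M0 < 2^(w'+1) := by
      apply Nat.lt_pow_two_of_testBit
      intro i hi
      rw [hM0def, pv_band_cast_testBit, Nat.testBit_two_pow_sub_one]
      simp [show ¬ (i < w'+1) by omega]
    -- A's initial bit list is the bits of M0
    have hstate0 : (PySem.List.pyRange 0 width 1).map (fun i => PySem.Int.band (pvShr crc_prev i) 1)
        = pvBits (w'+1) M0 := by
      rw [PySem.List.pyRange_one, List.map_map]
      have hlen : (width - 0).toNat = w'+1 := by rw [hwidth]; omega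
      rw [hlen]
      unfold pvBits
      apply List.map_congr_left
      intro k hk
      simp only [List.mem_range] at hk
      simp only [Function.comp_apply, zero_add, pvShr_natCast, pv_band_shift_one]
      rw [show pvBitI M0 k = if M0.testBit k then (1:Int) else 0 from rfl,
        hM0def, pv_band_cast_testBit, Nat.testBit_two_pow_sub_one]
      simp [hk]
    obtain ⟨M', hM'lt, hA, hB⟩ := pv_loop_sim width polynom data w' hwidth XM hXM
      (PySem.List.pyRange 0 data_width 1) M0 hM0lt
    -- evaluate A
    have hAval : crc_calc data_width width polynom crc_prev data = ((M' : Nat) : Int) := by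
      simp only [crc_calc]
      rw [hstate0, hA]
      have hr := pv_recon (w'+1) M' 0 0 hM'lt
      simp only [Nat.cast_zero] at hr
      rw [hr, Nat.zero_or, Nat.shiftLeft_zero]
    -- evaluate B
    have hmask : (pvShl 1 width - 1 : Int) = (((2^(w'+1) - 1 : Nat)) : Int) := by
      rw [hwidth]
      have h1 : pvShl 1 ((w'+1 : Nat) : Int) = ((2^(w'+1) : Nat) : Int) := by
        unfold pvShl
        rw [Int.toNat_natCast]
        rw [show ((1:Int) <<< (w'+1)) = ((1 <<< (w'+1) : Nat) : Int) from rfl, Nat.one_shiftLeft]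
      rw [h1, Nat.cast_sub (show 1 ≤ 2^(w'+1) from Nat.one_le_two_pow)]
      norm_num
    have hmask1 : ((((2^(w'+1) - 1 : Nat)) : Int) - 1) = (((2^(w'+1) - 2 : Nat)) : Int) := by
      have h2 := pv_pow_ge_two w'
      rw [Nat.cast_sub (by omega), Nat.cast_sub (by omega)]
      push_cast
      ring
    have hBval : crc_calc_alt data_width width polynom crc_prev data = ((M' : Nat) : Int) := by
      simp only [crc_calc_alt]
      rw [hmask, hmask1, hXMcast, hM0cast, hB]
    rw [hAval, hBval]
  · -- width = 0 and data_width ≤ 0: both programs return 0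
    subst hw0
    have hnil : PySem.List.pyRange 0 data_width 1 = [] := PySem.List.pyRange_one_eq_nil hdw
    have hnil0 : PySem.List.pyRange 0 0 1 = [] := PySem.List.pyRange_one_eq_nil (le_refl 0)
    simp only [crc_calc, crc_calc_alt]
    rw [hnil, hnil0]
    simp only [List.map_nil, List.foldl_nil]
    rw [show (pvShl 1 0 - 1 : Int) = 0 from rfl, PySem.Int.band_zero]
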